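-- pv_equiv track=rewrite | github.com/squirrel289/temple | asv_benchmarks/bench_tokenizer_patterns.py | create_nested_template
-- ===== SOURCE A (Python) =====
-- def create_nested_template(depth=10):
--     """Create template with deeply nested tokens."""
--     template = "outer: {{ data }}\n"
--     for i in range(depth):
--         template += ("{% if level %}\n  nested content\n")
--         template += ("  {{ nested }}\n")
--     for i in range(depth):
--         template += ("{% endif %}\n")
--     return template
-- ===== SOURCE B (Python) =====
-- def create_nested_template(depth=10):
--     """Create template with deeply nested tokens."""
--     inner = "{% if level %}\n  nested content\n  {{ nested }}\n"
--     return "outer: {{ data }}\n" + inner * depth + "{% endif %}\n" * depth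
-- ===== Notes on version B (the rewrite author's own statement) =====
-- stated objective: idiomatic
-- what changed: Replaces the two accumulating for-loops with a single closed-form expression using string repetition (block * depth).
import Mathlib
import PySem

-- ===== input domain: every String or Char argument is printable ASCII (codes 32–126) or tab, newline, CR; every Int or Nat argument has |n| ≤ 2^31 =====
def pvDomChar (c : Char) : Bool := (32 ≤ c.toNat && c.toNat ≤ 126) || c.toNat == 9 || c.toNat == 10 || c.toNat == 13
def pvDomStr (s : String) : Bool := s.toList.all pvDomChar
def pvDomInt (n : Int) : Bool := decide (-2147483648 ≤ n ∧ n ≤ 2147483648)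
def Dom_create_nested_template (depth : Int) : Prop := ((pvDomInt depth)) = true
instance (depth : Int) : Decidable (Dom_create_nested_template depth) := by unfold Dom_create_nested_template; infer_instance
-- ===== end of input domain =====

-- B replaces A's two accumulating loops by a closed-form expression using string repetition; objective: idiomatic.

-- ===== PORT A =====
def create_nested_template (depth : Int) : String :=
  let template := "outer: {{ data }}\n"
  let template := (PySem.List.pyRange 0 depth 1).foldl
    (fun t _ => (t ++ "{% if level %}\n  nested content\n") ++ "  {{ nested }}\n") template
  let template := (PySem.List.pyRange 0 depth 1).foldl
    (fun t _ => t ++ "{% endif %}\n") template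
  template

-- ===== PORT B =====
-- Python "s" * n (n may be ≤ 0, giving ""):
def pyStrMul (s : String) (n : Int) : String := String.join (List.replicate n.toNat s)

def create_nested_template_alt (depth : Int) : String :=
  let inner := "{% if level %}\n  nested content\n  {{ nested }}\n"
  "outer: {{ data }}\n" ++ pyStrMul inner depth ++ pyStrMul "{% endif %}\n" depth

-- ===== PRECONDITION & SPEC =====
def Spec_create_nested_template (depth : Int) (out : String) : Prop := out = create_nested_template_alt depth
instance (depth : Int) (out : String) : Decidable (Spec_create_nested_template depth out) := by unfold Spec_create_nested_template; infer_instance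

-- ===== CLAIM (what is proved, stated in full; the proofs are below) =====
def Claim_equal_create_nested_template : Prop := ∀ (depth : Int), Dom_create_nested_template depth → Spec_create_nested_template depth (create_nested_template depth)

-- ===== LEMMAS AND PROOFS =====

theorem join_replicate_succ (c : String) (n : Nat) :
    String.join (List.replicate (n + 1) c) = c ++ String.join (List.replicate n c) := by
  induction n with
  | zero => simp [String.join]
  | succ m ih =>
    rw [List.replicate_succ (n := m + 1)]
    simp only [String.join, List.foldl_cons] at ih ⊢
    rw [List.replicate_succ (n := m)]
    simp only [List.foldl_cons]
    have aux : ∀ (l : List String) (a b : String),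
        l.foldl (fun r s => r ++ s) (a ++ b) = a ++ l.foldl (fun r s => r ++ s) b := by
      intro l
      induction l with
      | nil => intro a b; rfl
      | cons y ys ihl => intro a b; simp only [List.foldl_cons, String.append_assoc, ihl]
    simp only [aux, String.append_assoc]
    simp

theorem foldl_const_append (c : String) :
    ∀ (l : List Int) (s : String),
      l.foldl (fun t _ => t ++ c) s = s ++ String.join (List.replicate l.length c) := by
  intro l
  induction l with
  | nil => intro s; simp [String.join]
  | cons x xs ih =>
    intro s
    simp only [List.foldl_cons, List.length_cons, join_replicate_succ]
    rw [ih, String.append_assoc]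

theorem create_nested_template_spec : Claim_equal_create_nested_template := by
  intro depth _
  unfold Spec_create_nested_template create_nested_template create_nested_template_alt pyStrMul
  simp only []
  have h1 : (fun (t : String) (_ : Int) =>
      (t ++ "{% if level %}\n  nested content\n") ++ "  {{ nested }}\n")
      = (fun (t : String) (_ : Int) =>
      t ++ "{% if level %}\n  nested content\n  {{ nested }}\n") := by
    funext t _; rw [String.append_assoc]; rfl
  rw [h1, foldl_const_append, foldl_const_append, PySem.List.length_pyRange_one,
      show depth - (0:Int) = depth from by ring]
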